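-- pv_equiv track=rewrite | github.com/JackAiReal/agent-platform | 自动化/接码平台/mail-bridge/mail_bridge_service.py | upsert_env_value
-- ===== SOURCE A (Python) =====
-- def upsert_env_value(lines: list[str], key: str, value: str) -> list[str]:
--     rendered = f"{key}={value}"
--     updated = False
--     result: list[str] = []
--     prefix = f"{key}="
--     for line in lines:
--         if line.startswith(prefix):
--             if not updated:
--                 result.append(rendered)
--                 updated = True
--             continue
--         result.append(line)
--     if not updated:
--         result.append(rendered)
--     return result
-- ===== SOURCE B (Python) =====
-- def upsert_env_value(lines: list[str], key: str, value: str) -> list[str]: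
--     prefix = f"{key}="
--     rendered = f"{key}={value}"
--     idx = next((i for i, l in enumerate(lines) if l.startswith(prefix)), None)
--     if idx is None:
--         return lines + [rendered]
--     return [rendered if j == idx else l
--             for j, l in enumerate(lines)
--             if j == idx or not l.startswith(prefix)]
-- ===== Notes on version B (the rewrite author's own statement) =====
-- stated objective: alternative
-- what changed: Replaces A's single-pass flag/accumulator loop with a two-phase shape: first locate the index of the first matching line, then either append (no match) or rebuild the list in one comprehension that substitutes at that index and drops later matches.
import Mathlib
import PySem

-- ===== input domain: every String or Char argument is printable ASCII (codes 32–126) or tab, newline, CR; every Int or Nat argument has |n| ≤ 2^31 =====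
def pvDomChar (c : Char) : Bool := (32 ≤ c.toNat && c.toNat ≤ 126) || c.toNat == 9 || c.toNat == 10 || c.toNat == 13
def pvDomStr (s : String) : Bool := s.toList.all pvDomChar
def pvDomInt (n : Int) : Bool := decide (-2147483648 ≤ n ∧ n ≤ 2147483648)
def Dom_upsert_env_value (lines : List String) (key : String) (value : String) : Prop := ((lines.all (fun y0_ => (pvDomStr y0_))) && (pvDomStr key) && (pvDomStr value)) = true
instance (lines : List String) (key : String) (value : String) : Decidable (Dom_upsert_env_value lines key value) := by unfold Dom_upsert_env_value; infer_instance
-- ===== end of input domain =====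

-- B replaces A's single-pass flag/accumulator loop by find-first-match-index then rebuild; same O(n) cost, different decomposition.

-- ===== PORT A =====
-- A's for-loop with its (updated, result) state, as the obvious structural recursion over lines.
def upsertLoopA (pre ren : String) : List String → Bool → List String → List String
  | [], updated, result => if updated = false then result ++ [ren] else result
  | l :: ls, updated, result =>
      if PySem.Str.startswith l pre then
        if updated = false then upsertLoopA pre ren ls true (result ++ [ren])
        else upsertLoopA pre ren ls true result
      else upsertLoopA pre ren ls updated (result ++ [l])

def upsert_env_value (lines : List String) (key : String) (value : String) : List String :=
  upsertLoopA (key ++ "=") (key ++ "=" ++ value) lines false []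

-- ===== PORT B =====
-- port of next((i for i, l in enumerate(lines) if l.startswith(prefix)), None)
def findKeyIdx (pre : String) : List String → Option Int
  | [] => none
  | l :: ls => if PySem.Str.startswith l pre then some 0 else (findKeyIdx pre ls).map (· + 1)

def upsert_env_value_alt (lines : List String) (key : String) (value : String) : List String :=
  let pre := key ++ "="
  let ren := key ++ "=" ++ value
  match findKeyIdx pre lines with
  | none => lines ++ [ren]
  | some i =>
      (PySem.List.enumerate lines).flatMap (fun jl =>
        if jl.1 = i then [ren]
        else if PySem.Str.startswith jl.2 pre then [] else [jl.2])

-- ===== PRECONDITION & SPEC =====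
def Spec_upsert_env_value (lines : List String) (key : String) (value : String) (out : List String) : Prop := out = upsert_env_value_alt lines key value
instance (lines : List String) (key : String) (value : String) (out : List String) : Decidable (Spec_upsert_env_value lines key value out) := by unfold Spec_upsert_env_value; infer_instance

-- ===== CLAIM (what is proved, stated in full; the proofs are below) =====
def Claim_equal_upsert_env_value : Prop := ∀ (lines : List String) (key : String) (value : String), Dom_upsert_env_value lines key value → Spec_upsert_env_value lines key value (upsert_env_value lines key value)

-- ===== LEMMAS AND PROOFS =====

-- B's result for fixed prefix/rendered, as a function of the line list (proof-side mirror of upsert_env_value_alt).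
def altCore (pre ren : String) (lines : List String) : List String :=
  match findKeyIdx pre lines with
  | none => lines ++ [ren]
  | some i =>
      (PySem.List.enumerate lines).flatMap (fun jl =>
        if jl.1 = i then [ren]
        else if PySem.Str.startswith jl.2 pre then [] else [jl.2])

lemma alt_eq_altCore (lines : List String) (key value : String) :
    upsert_env_value_alt lines key value = altCore (key ++ "=") (key ++ "=" ++ value) lines := rfl

-- once updated, A's loop just keeps the non-matching lines
lemma loopA_true (pre ren : String) (ls : List String) (r : List String) :
    upsertLoopA pre ren ls true r = r ++ ls.filter (fun l => !PySem.Str.startswith l pre) := by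
  induction ls generalizing r with
  | nil => simp [upsertLoopA]
  | cons l ls ih =>
    by_cases h : PySem.Chars.startswith l.toList pre.toList = true
    · simp [upsertLoopA, h, ih]
    · simp [upsertLoopA, h, ih]

-- past the matched index, B's comprehension is exactly that filter (stated on the Chars normal form)
lemma flatMap_enum_shift (pre ren : String) (ls : List String) (s i : Int) (hlt : i < s) :
    (PySem.List.enumerate ls s).flatMap (fun jl =>
        if jl.1 = i then [ren]
        else if PySem.Chars.startswith jl.2.toList pre.toList = true then [] else [jl.2])
      = ls.filter (fun l => !PySem.Chars.startswith l.toList pre.toList) := by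
  induction ls generalizing s with
  | nil => simp [PySem.List.enumerate_nil]
  | cons l ls ih =>
    have hne : s ≠ i := by omega
    by_cases h : PySem.Chars.startswith l.toList pre.toList = true
    · simp [PySem.List.enumerate_cons, hne, h, ih (s + 1) (by omega)]
    · simp [PySem.List.enumerate_cons, hne, h, ih (s + 1) (by omega)]

lemma findKeyIdx_nonneg (pre : String) (ls : List String) (i : Int)
    (h : findKeyIdx pre ls = some i) : 0 ≤ i := by
  induction ls generalizing i with
  | nil => simp [findKeyIdx] at h
  | cons l ls ih =>
    by_cases hs : PySem.Chars.startswith l.toList pre.toList = true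
    · simp [findKeyIdx, hs] at h; omega
    · simp [findKeyIdx, hs] at h
      obtain ⟨j, hj, rfl⟩ := h
      have := ih j hj
      omega

-- shifting both the enumeration start and the target index by one does not change the flatMap
lemma flatMap_enum_add (pre ren : String) (ls : List String) (s i : Int) :
    (PySem.List.enumerate ls (s + 1)).flatMap (fun jl =>
        if jl.1 = i + 1 then [ren]
        else if PySem.Chars.startswith jl.2.toList pre.toList = true then [] else [jl.2])
      = (PySem.List.enumerate ls s).flatMap (fun jl =>
        if jl.1 = i then [ren]
        else if PySem.Chars.startswith jl.2.toList pre.toList = true then [] else [jl.2]) := by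
  induction ls generalizing s with
  | nil => simp [PySem.List.enumerate_nil]
  | cons l ls ih =>
    have hiff : (s + 1 = i + 1) = (s = i) := by
      apply propext; omega
    simp only [PySem.List.enumerate_cons, List.flatMap_cons, hiff, ih (s + 1)]

-- main invariant: A's not-yet-updated loop equals r ++ B's result
lemma loopA_false (pre ren : String) (ls : List String) (r : List String) :
    upsertLoopA pre ren ls false r = r ++ altCore pre ren ls := by
  induction ls generalizing r with
  | nil => simp [upsertLoopA, altCore, findKeyIdx]
  | cons l ls ih =>
    by_cases h : PySem.Chars.startswith l.toList pre.toList = true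
    · -- first match here: A switches to updated; B finds index 0 and filters the rest
      simp only [upsertLoopA, PySem.Str.startswith_eq, h, if_true]
      rw [loopA_true]
      simp only [altCore, findKeyIdx, PySem.Str.startswith_eq, h, if_true,
        PySem.List.enumerate_cons, List.flatMap_cons, List.append_assoc]
      exact congrArg (fun t => r ++ ([ren] ++ t)) (flatMap_enum_shift pre ren ls 1 0 (by omega)).symm
    · -- no match yet: both keep l and recurse
      simp only [upsertLoopA, PySem.Str.startswith_eq, h, Bool.false_eq_true, if_false]
      rw [ih]
      cases hf : findKeyIdx pre ls with
      | none =>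
        simp [altCore, findKeyIdx, h, hf]
      | some i =>
        have hi : 0 ≤ i := findKeyIdx_nonneg pre ls i hf
        have h0 : ¬ ((0 : Int) = i + 1) := by omega
        simp only [altCore, findKeyIdx, PySem.Str.startswith_eq, h, Bool.false_eq_true,
          if_false, hf, Option.map_some, PySem.List.enumerate_cons, List.flatMap_cons, h0,
          List.append_assoc]
        exact congrArg (fun t => r ++ ([l] ++ t)) (flatMap_enum_add pre ren ls 0 i).symm

-- ===== VERDICT (by name: the statement is the Claim_ definition above) =====
theorem upsert_env_value_spec : Claim_equal_upsert_env_value := by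
  intro lines key value _
  show upsert_env_value lines key value = upsert_env_value_alt lines key value
  rw [alt_eq_altCore, upsert_env_value, loopA_false]
  rfl
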